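-- pv_equiv track=rewrite | github.com/hjunghenn/Python_Code_for_Computer_Symbolic_Mathematics | Number.py | addition_modtable
-- ===== SOURCE A (Python) =====
-- def addition_modtable(m):
--     table = []
--     header = []
--     for k in range(m):
--         header = header+[str(k)]
--     header = ['+'] + header
--     table = [header]
--
--     for i in range(m):
--         row = []
--         for j in range(m):
--             row = row + [str((i+j)%m)]
--         row = [str(i)] + row
--         table = table + [row]
--     return table
-- ===== SOURCE B (Python) =====
-- def addition_modtable(m):
--     base = [str(k) for k in range(m)]
--     table = [['+'] + base]
--     cur = base
--     for i in range(m):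
--         table.append([str(i)] + cur)
--         cur = cur[1:] + cur[:1]
--     return table
-- ===== Notes on version B (the rewrite author's own statement) =====
-- stated objective: faster
-- what changed: Instead of computing (i+j)%m for every cell with quadratic 'row = row + [...]' rebuilding, B builds one base row of digit strings and derives each successive data row by a cyclic left rotation (cur[1:]+cur[:1]), appending rows in place.
import Mathlib
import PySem

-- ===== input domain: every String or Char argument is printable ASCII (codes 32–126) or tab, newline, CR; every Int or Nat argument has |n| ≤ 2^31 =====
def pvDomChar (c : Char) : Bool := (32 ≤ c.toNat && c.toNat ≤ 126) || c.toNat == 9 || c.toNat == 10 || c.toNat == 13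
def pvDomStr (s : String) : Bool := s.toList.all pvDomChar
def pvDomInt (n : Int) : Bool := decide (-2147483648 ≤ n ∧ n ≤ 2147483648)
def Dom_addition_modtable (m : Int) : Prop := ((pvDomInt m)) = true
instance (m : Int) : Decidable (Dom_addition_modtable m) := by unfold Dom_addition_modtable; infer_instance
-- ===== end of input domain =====

-- B replaces A's per-cell (i+j)%m with a base row rotated cyclically row by row: measurably faster (asymptotic).

-- ===== PORT A =====
def addition_modtable (m : Int) : List (List String) :=
  let header := (PySem.List.pyRange 0 m 1).foldl (fun h k => h ++ [PySem.Int.toStr k]) ([] : List String)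
  let header := ["+"] ++ header
  let table := [header]
  (PySem.List.pyRange 0 m 1).foldl
    (fun table i =>
      let row := (PySem.List.pyRange 0 m 1).foldl
        (fun row j => row ++ [PySem.Int.toStr (PySem.Int.mod (i + j) m)]) ([] : List String)
      let row := [PySem.Int.toStr i] ++ row
      table ++ [row]) table

-- ===== PORT B =====
def addition_modtable_alt (m : Int) : List (List String) :=
  let base := (PySem.List.pyRange 0 m 1).map (fun k => PySem.Int.toStr k)
  let table := [["+"] ++ base]
  ((PySem.List.pyRange 0 m 1).foldl
    (fun (st : List (List String) × List String) i =>
      (st.1 ++ [[PySem.Int.toStr i] ++ st.2],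
       PySem.List.slice st.2 (some 1) none ++ PySem.List.slice st.2 none (some 1)))
    (table, base)).1

-- ===== PRECONDITION & SPEC =====
def Spec_addition_modtable (m : Int) (out : List (List String)) : Prop := out = addition_modtable_alt m
instance (m : Int) (out : List (List String)) : Decidable (Spec_addition_modtable m out) := by unfold Spec_addition_modtable; infer_instance

-- ===== CLAIM (what is proved, stated in full; the proofs are below) =====
def Claim_equal_addition_modtable : Prop := ∀ (m : Int), Dom_addition_modtable m → Spec_addition_modtable m (addition_modtable m)

-- ===== LEMMAS AND PROOFS =====

-- base row of digit strings, and row data i as its left rotation by i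
def pvBase (n : Nat) : List String := (List.range n).map (fun (k : Nat) => PySem.Int.toStr (k : Int))
def pvRow (n i : Nat) : List String := (pvBase n).rotate i
def pvTable (n : Nat) : List (List String) :=
  (["+"] ++ pvBase n) :: (List.range n).map (fun (i : Nat) => [PySem.Int.toStr (i : Int)] ++ pvRow n i)

theorem pv_range_cast (m : Int) : PySem.List.pyRange 0 m 1 = (List.range m.toNat).map (fun k : Nat => (k : Int)) := by
  rw [PySem.List.pyRange_one]
  simp only [Int.sub_zero, Int.zero_add]

theorem pv_drop_take_rotate {α : Type} (l : List α) : l.drop 1 ++ l.take 1 = l.rotate 1 := by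
  cases l with
  | nil => simp
  | cons a t => simp [List.rotate_cons_succ]

theorem pv_rowA (n i : Nat) (_hi : i < n) :
    (List.range n).map (fun (j : Nat) => PySem.Int.toStr (PySem.Int.mod ((i : Int) + (j : Int)) (n : Int))) =
    pvRow n i := by
  apply List.ext_getElem
  · simp [pvRow, pvBase]
  · intro g h1 h2
    simp only [List.getElem_map, List.getElem_range, pvRow, pvBase, List.getElem_rotate,
      List.length_map, List.length_range]
    have hc : ((i : Int) + (g : Int)) = ((i + g : Nat) : Int) := by push_cast; ring
    rw [hc, PySem.Int.mod_natCast]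
    have hcomm : i + g = g + i := Nat.add_comm i g
    rw [hcomm]

theorem pv_A_eq (m : Int) : addition_modtable m = pvTable m.toNat := by
  by_cases hm : m ≤ 0
  · have h0 : m.toNat = 0 := by omega
    rw [addition_modtable, PySem.List.pyRange_one_eq_nil hm]
    simp [pvTable, pvBase, h0]
  · push_neg at hm
    lift m to ℕ using hm.le with n
    have hn : (n : Int).toNat = n := Int.toNat_natCast n
    rw [addition_modtable, pv_range_cast, hn]
    simp only [List.foldl_map, PySem.List.foldl_append_singleton_eq_map, List.nil_append]
    unfold pvTable
    rw [List.singleton_append]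
    congr 1
    apply List.map_congr_left
    intro a ha
    rw [List.mem_range] at ha
    exact congrArg (fun l => [PySem.Int.toStr (a : Int)] ++ l) (pv_rowA n a ha)

theorem pv_rot (n i : Nat) : (pvRow n i).drop 1 ++ (pvRow n i).take 1 = pvRow n (i + 1) := by
  rw [pv_drop_take_rotate, pvRow, pvRow, List.rotate_rotate]

theorem pv_B_inv (n : Nat) : ∀ (len i : Nat) (tbl : List (List String)), i + len = n →
    (List.foldl
      (fun (st : List (List String) × List String) (x : Int) =>
        (st.1 ++ [[PySem.Int.toStr x] ++ st.2],
         PySem.List.slice st.2 (some 1) none ++ PySem.List.slice st.2 none (some 1)))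
      (tbl, pvRow n i) ((List.range' i len).map (fun k : Nat => (k : Int)))).1 =
    tbl ++ (List.range' i len).map (fun (k : Nat) => [PySem.Int.toStr (k : Int)] ++ pvRow n k) := by
  intro len
  induction len with
  | zero => intro i tbl _; simp
  | succ l ih =>
    intro i tbl hlen
    rw [List.range'_succ]
    simp only [List.map_cons, List.foldl_cons]
    rw [PySem.List.slice_from_one, PySem.List.slice_to _ (by omega)]
    have h1 : (pvRow n i).tail = (pvRow n i).drop 1 := by simp
    have ht : ((1 : Int)).toNat = 1 := rfl
    rw [h1, ht, pv_rot n i, ih (i + 1) _ (by omega)]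
    simp

theorem pv_B_eq (m : Int) : addition_modtable_alt m = pvTable m.toNat := by
  by_cases hm : m ≤ 0
  · have h0 : m.toNat = 0 := by omega
    rw [addition_modtable_alt, PySem.List.pyRange_one_eq_nil hm]
    simp [pvTable, pvBase, h0]
  · push_neg at hm
    lift m to ℕ using hm.le with n
    have hn : (n : Int).toNat = n := Int.toNat_natCast n
    rw [addition_modtable_alt, pv_range_cast, hn]
    have hbase : ((List.range n).map (fun k : Nat => (k : Int))).map (fun k => PySem.Int.toStr k)
        = pvRow n 0 := by
      simp [pvRow, pvBase, List.map_map, Function.comp]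
    rw [hbase]
    have hrange : List.range n = List.range' 0 n := List.range_eq_range'
    rw [hrange, pv_B_inv n n 0 _ (by omega)]
    unfold pvTable
    simp [pvRow, pvBase, hrange]

-- ===== VERDICT (by name: the statement is the Claim_ definition above) =====
theorem addition_modtable_spec : Claim_equal_addition_modtable := by
  intro m _
  unfold Spec_addition_modtable
  rw [pv_A_eq, pv_B_eq]
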